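-- pv_equiv track=rewrite | github.com/Murugavel14/TENSEMI | python/python_level3/python_L3.py | sum14
-- ===== SOURCE A (Python) =====
-- def sum14(no):
--     temp = no
--     sum_of_digits = 0
--     while temp > 0:
--         div = temp % 10
--         temp = temp // 10
--         sum_of_digits = sum_of_digits + div
--     if sum_of_digits == 14:
--         return 1
--     else:
--         return 0
-- ===== SOURCE B (Python) =====
-- def sum14(no):
--     # String-based digit sum: convert to decimal text instead of %10 // 10 peeling.
--     # Guard no > 0 so non-positive inputs give sum 0 exactly as A's while-loop does.
--     s = sum(int(c) for c in str(no)) if no > 0 else 0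
--     return 1 if s == 14 else 0
-- ===== Notes on version B (the rewrite author's own statement) =====
-- stated objective: idiomatic
-- what changed: B sums the digit characters of the decimal string representation instead of peeling digits with modulo and floor division in a while-loop; the positivity guard makes non-positive inputs behave exactly like A.
import Mathlib
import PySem

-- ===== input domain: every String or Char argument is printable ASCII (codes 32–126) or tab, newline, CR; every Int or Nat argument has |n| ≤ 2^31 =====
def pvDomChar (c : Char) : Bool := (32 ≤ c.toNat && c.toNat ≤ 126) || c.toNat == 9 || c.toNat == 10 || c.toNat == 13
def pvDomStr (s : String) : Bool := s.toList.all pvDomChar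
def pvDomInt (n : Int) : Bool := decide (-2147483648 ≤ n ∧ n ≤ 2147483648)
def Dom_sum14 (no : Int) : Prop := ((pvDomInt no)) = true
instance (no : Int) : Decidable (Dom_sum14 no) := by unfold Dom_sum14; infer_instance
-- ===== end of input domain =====

-- B replaces A's %10///10 while-loop with summing the digit characters of str(no) (more idiomatic; same cost).


-- ===== PORT A =====
-- the while-loop: state (temp, sum_of_digits)
def sum14Loop (temp s : Int) : Int :=
  if temp > 0 then
    sum14Loop (PySem.Int.floordiv temp 10) (s + PySem.Int.mod temp 10)
  else s
termination_by temp.toNat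
decreasing_by
  simp only [PySem.Int.floordiv, Int.fdiv_eq_ediv]
  omega

def sum14 (no : Int) : Int :=
  if sum14Loop no 0 = 14 then 1 else 0

-- ===== PORT B =====
-- int(c) on a single decimal digit character equals its code minus 48; this is exact here
-- because str(no) for no > 0 consists of decimal digits only.
def sum14_alt (no : Int) : Int :=
  let s : Int :=
    if no > 0 then
      (PySem.Int.toStr no).toList.foldl (fun acc c => acc + ((c.toNat : Int) - 48)) 0
    else 0
  if s = 14 then 1 else 0

-- ===== PRECONDITION & SPEC =====
def Spec_sum14 (no : Int) (out : Int) : Prop := out = sum14_alt no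
instance (no : Int) (out : Int) : Decidable (Spec_sum14 no out) := by unfold Spec_sum14; infer_instance

-- ===== CLAIM (what is proved, stated in full; the proofs are below) =====
def Claim_equal_sum14 : Prop := ∀ (no : Int), Dom_sum14 no → Spec_sum14 no (sum14 no)

-- ===== LEMMAS AND PROOFS =====

-- digit sum of a natural, little-endian peeling (reference function for both sides)
def dsum : Nat → Int
  | 0 => 0
  | n + 1 => (((n + 1) % 10 : Nat) : Int) + dsum ((n + 1) / 10)
decreasing_by omega

theorem dsum_pos (n : Nat) (h : 0 < n) : dsum n = ((n % 10 : Nat) : Int) + dsum (n / 10) := by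
  cases n with
  | zero => omega
  | succ m => simp [dsum]

-- A's loop computes s + dsum n
theorem sum14Loop_eq (n : Nat) : ∀ s : Int, sum14Loop (n : Int) s = s + dsum n := by
  induction n using Nat.strong_induction_on with
  | _ n ih =>
    intro s
    rw [sum14Loop]
    by_cases h : (n : Int) > 0
    · have hn : 0 < n := by exact_mod_cast h
      have h10 : PySem.Int.floordiv (n : Int) 10 = ((n / 10 : Nat) : Int) := by
        simp only [PySem.Int.floordiv, Int.fdiv_eq_ediv]
        omega
      have hm : PySem.Int.mod (n : Int) 10 = ((n % 10 : Nat) : Int) := by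
        simp only [PySem.Int.mod, Int.fmod_eq_emod]
        omega
      rw [if_pos h, h10, hm, ih (n / 10) (by omega)]
      rw [dsum_pos n hn]; ring
    · have hn : n = 0 := by exact_mod_cast by omega
      rw [if_neg h, hn]; simp [dsum]

-- digit char values
theorem digitChar_val (d : Nat) (h : d < 10) : ((Nat.digitChar d).toNat : Int) - 48 = (d : Int) := by
  interval_cases d <;> decide

-- char sum of a digit-char list
def csum (l : List Char) : Int := (l.map (fun c => ((c.toNat : Int) - 48))).sum

theorem csum_toDigitsCore (f : Nat) : ∀ n ds, n < f →
    csum (Nat.toDigitsCore 10 f n ds) = dsum n + csum ds := by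
  induction f with
  | zero => intro n ds h; omega
  | succ f ih =>
    intro n ds h
    rw [Nat.toDigitsCore]
    by_cases h0 : n / 10 = 0
    · simp only [h0, if_pos]
      cases n with
      | zero =>
        simp [csum, dsum, digitChar_val 0 (by norm_num)]
      | succ m =>
        simp only [csum, List.map_cons, List.sum_cons,
          digitChar_val ((m+1) % 10) (Nat.mod_lt _ (by norm_num))]
        rw [dsum_pos (m+1) (by omega), h0]
        simp [dsum]
    · rw [if_neg h0]
      rw [ih (n / 10) _ (by omega)]
      have hn : 0 < n := by omega
      rw [dsum_pos n hn]
      simp only [csum, List.map_cons, List.sum_cons,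
        digitChar_val (n % 10) (Nat.mod_lt _ (by norm_num))]
      ring

-- B's foldl equals the char sum
theorem foldl_csum (l : List Char) : ∀ s : Int,
    l.foldl (fun acc c => acc + ((c.toNat : Int) - 48)) s = s + csum l := by
  induction l with
  | nil => intro s; simp [csum]
  | cons c t ih => intro s; simp [csum, List.foldl, ih]; ring

theorem toStr_pos (no : Int) (h : 0 < no) :
    (PySem.Int.toStr no).toList = Nat.toDigits 10 no.toNat := by
  rw [PySem.Int.toList_toStr]
  unfold PySem.Int.toChars
  rw [if_neg (by omega)]

-- ===== VERDICT (by name: the statement is the Claim_ definition above) =====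
theorem sum14_spec : Claim_equal_sum14 := by
  intro no _
  unfold Spec_sum14 sum14 sum14_alt
  by_cases h : no > 0
  · have hn : no = (no.toNat : Int) := by omega
    have hA : sum14Loop no 0 = dsum no.toNat := by
      conv_lhs => rw [hn]
      rw [sum14Loop_eq no.toNat 0]; ring
    have hB : (PySem.Int.toStr no).toList.foldl
        (fun acc c => acc + ((c.toNat : Int) - 48)) 0 = dsum no.toNat := by
      rw [toStr_pos no h, foldl_csum, Nat.toDigits,
        csum_toDigitsCore (no.toNat + 1) no.toNat [] (by omega)]
      simp [csum]
    simp only [if_pos h, hA, hB]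
  · have hn : no.toNat = 0 := by omega
    have hA : sum14Loop no 0 = 0 := by rw [sum14Loop, if_neg h]
    simp [if_neg h, hA]
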